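-- pv_equiv track=rewrite | github.com/Lucasbarmat/Algo1 | python/parcial6.py | torena_gallinas
-- ===== SOURCE A (Python) =====
-- def contar_puntos(estrategia_jugador:str,estrategia_oponente:str)->int:
--     res:int = 0
--     if estrategia_jugador == "desvio" and estrategia_oponente == "desvio":
--         res = -10
--     elif estrategia_jugador == "desvio" and estrategia_oponente == "banco":
--         res = -15
--     elif estrategia_jugador == "banco" and estrategia_oponente == "desvio":
--         res = 10
--     elif estrategia_jugador == "banco" and estrategia_oponente == "banco":
--         res = -5
--     return res
--
-- def torena_gallinas(estrategias:dict[str,str])->dict[str,str]: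
--     res:dict[str,int] = {}
--
--     for nombre, estrategia in estrategias.items():
--         puntos:int = 0
--
--         for nombre_rival, estrategia_rival in estrategias.items():
--             if nombre != nombre_rival:
--                 puntos += contar_puntos(estrategia,estrategia_rival)
--         res[nombre] = puntos
--     return res
-- ===== SOURCE B (Python) =====
-- def torena_gallinas(estrategias):
--     cd = sum(1 for e in estrategias.values() if e == "desvio")
--     cb = sum(1 for e in estrategias.values() if e == "banco")
--     res = {}
--     for nombre, e in estrategias.items():
--         if e == "desvio":
--             res[nombre] = -10 * (cd - 1) - 15 * cb
--         elif e == "banco":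
--             res[nombre] = 10 * cd - 5 * (cb - 1)
--         else:
--             res[nombre] = 0
--     return res
-- ===== Notes on version B (the rewrite author's own statement) =====
-- stated objective: faster
-- what changed: B counts the two strategies once and computes each player's score by a closed formula from the counts, removing A's inner scan over all rivals.
import Mathlib
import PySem

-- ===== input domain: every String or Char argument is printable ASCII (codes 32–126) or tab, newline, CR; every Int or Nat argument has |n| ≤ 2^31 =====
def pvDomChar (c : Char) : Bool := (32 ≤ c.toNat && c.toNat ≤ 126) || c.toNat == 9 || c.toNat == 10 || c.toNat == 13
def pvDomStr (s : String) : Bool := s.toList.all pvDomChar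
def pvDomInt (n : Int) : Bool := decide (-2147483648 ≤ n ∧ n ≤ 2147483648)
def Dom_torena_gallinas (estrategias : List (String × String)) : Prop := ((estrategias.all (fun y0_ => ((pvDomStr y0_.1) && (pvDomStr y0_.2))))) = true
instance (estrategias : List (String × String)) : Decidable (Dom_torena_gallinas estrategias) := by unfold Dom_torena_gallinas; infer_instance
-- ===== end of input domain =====

-- B replaces A's quadratic all-pairs scan by counting the two strategies once and
-- scoring each player with a closed formula from the counts (faster, asymptotic).

-- ===== PORT A =====
def contar_puntos (estrategia_jugador : String) (estrategia_oponente : String) : Int :=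
  if estrategia_jugador == "desvio" && estrategia_oponente == "desvio" then -10
  else if estrategia_jugador == "desvio" && estrategia_oponente == "banco" then -15
  else if estrategia_jugador == "banco" && estrategia_oponente == "desvio" then 10
  else if estrategia_jugador == "banco" && estrategia_oponente == "banco" then -5
  else 0

def torena_gallinas (estrategias : List (String × String)) : List (String × Int) :=
  (estrategias.foldl (fun (res : PySem.Dict String Int) p =>
    let puntos : Int := estrategias.foldl (fun puntos q =>
      if p.1 != q.1 then puntos + contar_puntos p.2 q.2 else puntos) 0
    res.insert p.1 puntos) PySem.Dict.empty).items

-- ===== PORT B =====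
def torena_gallinas_alt (estrategias : List (String × String)) : List (String × Int) :=
  let cd : Int := estrategias.foldl (fun a q => if q.2 == "desvio" then a + 1 else a) 0
  let cb : Int := estrategias.foldl (fun a q => if q.2 == "banco" then a + 1 else a) 0
  (estrategias.foldl (fun (res : PySem.Dict String Int) p =>
    let v : Int :=
      if p.2 == "desvio" then -10 * (cd - 1) - 15 * cb
      else if p.2 == "banco" then 10 * cd - 5 * (cb - 1)
      else 0
    res.insert p.1 v) PySem.Dict.empty).items

-- ===== PRECONDITION & SPEC =====
-- Pre_ excludes association lists with duplicate player names: those do not represent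
-- a Python dict (A's parameter type), so any behaviour there is an artefact of the encoding.
def Pre_torena_gallinas (estrategias : List (String × String)) : Prop :=
  estrategias.Pairwise (fun a b => a.1 ≠ b.1)
instance (estrategias : List (String × String)) : Decidable (Pre_torena_gallinas estrategias) := by unfold Pre_torena_gallinas; infer_instance

def pvWitness_torena_gallinas : (List (String × String)) :=
  [("ana", "desvio"), ("bob", "banco"), ("eva", "desvio")]

def Spec_torena_gallinas (estrategias : List (String × String)) (out : List (String × Int)) : Prop := out = torena_gallinas_alt estrategias
instance (estrategias : List (String × String)) (out : List (String × Int)) : Decidable (Spec_torena_gallinas estrategias out) := by unfold Spec_torena_gallinas; infer_instance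

-- ===== CLAIM (what is proved, stated in full; the proofs are below) =====
def Claim_equal_torena_gallinas : Prop := ∀ (estrategias : List (String × String)), Dom_torena_gallinas estrategias → Pre_torena_gallinas estrategias → Spec_torena_gallinas estrategias (torena_gallinas estrategias)

-- ===== LEMMAS AND PROOFS =====

-- a conditional-accumulate foldl is init + sum of the mapped contributions
theorem pv_foldl_if_add (l : List (String × String)) (c : String × String → Bool)
    (f : String × String → Int) (x : Int) :
    l.foldl (fun a q => if c q then a + f q else a) x
      = x + (l.map (fun q => if c q then f q else 0)).sum := by
  induction l generalizing x with
  | nil => simp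
  | cons h t ih =>
    simp only [List.foldl_cons, List.map_cons, List.sum_cons, ih]
    split_ifs <;> ring

-- contar_puntos decomposed into indicator form
theorem pv_contar_split (s t : String) :
    contar_puntos s t =
      contar_puntos s "desvio" * (if t == "desvio" then 1 else 0) +
      contar_puntos s "banco" * (if t == "banco" then 1 else 0) := by
  by_cases hd : t = "desvio"
  · subst hd; simp [contar_puntos]
  · by_cases hb : t = "banco"
    · subst hb; simp [contar_puntos]
    · simp [contar_puntos, hd, hb]

theorem pv_sum_map_add (l : List (String × String)) (f g : String × String → Int) :
    (l.map (fun q => f q + g q)).sum = (l.map f).sum + (l.map g).sum := by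
  induction l with
  | nil => simp
  | cons h t ih => simp [ih]; ring

-- summing the filtered map over a duplicate-free list removes exactly the p term
theorem pv_sum_except (l : List (String × String)) (p : String × String)
    (f : String × String → Int)
    (hnd : l.Pairwise (fun a b => a.1 ≠ b.1)) (hp : p ∈ l) :
    (l.map (fun q => if p.1 != q.1 then f q else 0)).sum
      = (l.map f).sum - f p := by
  induction l with
  | nil => cases hp
  | cons h t ih =>
    rcases List.pairwise_cons.mp hnd with ⟨hh, ht⟩
    rcases List.mem_cons.mp hp with heq | hp
    · subst heq
      have hcongr : List.map (fun q => if p.1 != q.1 then f q else 0) t = List.map f t :=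
        List.map_congr_left (by intro q hq; simp [bne, hh q hq])
      rw [List.map_cons, List.sum_cons, hcongr, List.map_cons, List.sum_cons]
      simp
    · have hne : p.1 ≠ h.1 := fun e => (hh p hp) e.symm
      have hb : (p.1 != h.1) = true := by simpa [bne] using hne
      simp only [List.map_cons, List.sum_cons, hb, if_pos, ih ht hp]
      ring

theorem pv_inner_eq (l : List (String × String)) (p : String × String)
    (hnd : l.Pairwise (fun a b => a.1 ≠ b.1)) (hp : p ∈ l) :
    l.foldl (fun puntos q =>
        if p.1 != q.1 then puntos + contar_puntos p.2 q.2 else puntos) 0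
      = (if p.2 == "desvio" then
          -10 * (l.foldl (fun a q => if q.2 == "desvio" then a + 1 else a) 0 - 1)
            - 15 * l.foldl (fun a q => if q.2 == "banco" then a + 1 else a) 0
        else if p.2 == "banco" then
          10 * l.foldl (fun a q => if q.2 == "desvio" then a + 1 else a) 0
            - 5 * (l.foldl (fun a q => if q.2 == "banco" then a + 1 else a) 0 - 1)
        else 0) := by
  rw [pv_foldl_if_add l (fun q => p.1 != q.1) (fun q => contar_puntos p.2 q.2) 0,
      pv_foldl_if_add l (fun q => q.2 == "desvio") (fun _ => 1) 0,
      pv_foldl_if_add l (fun q => q.2 == "banco") (fun _ => 1) 0,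
      pv_sum_except l p _ hnd hp]
  have hsplit : (l.map (fun q => contar_puntos p.2 q.2)).sum
      = contar_puntos p.2 "desvio" * (l.map (fun q => if q.2 == "desvio" then (1:Int) else 0)).sum
        + contar_puntos p.2 "banco" * (l.map (fun q => if q.2 == "banco" then (1:Int) else 0)).sum := by
    rw [← List.sum_map_mul_left, ← List.sum_map_mul_left, ← pv_sum_map_add]
    exact congrArg List.sum (List.map_congr_left fun q _ => pv_contar_split p.2 q.2)
  rw [hsplit]
  by_cases hd : p.2 = "desvio"
  · simp [hd, contar_puntos]; ring
  · by_cases hb : p.2 = "banco"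
    · simp [hb, contar_puntos]; ring
    · simp [hd, hb, contar_puntos]

-- ===== VERDICT (by name: the statement is the Claim_ definition above) =====
theorem torena_gallinas_spec : Claim_equal_torena_gallinas := by
  intro l _ hpre
  unfold Spec_torena_gallinas torena_gallinas torena_gallinas_alt
  apply congrArg PySem.Dict.items
  apply PySem.List.foldl_congr_mem
  intro res p hp
  rw [pv_inner_eq l p hpre hp]
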